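-- pv_equiv track=rewrite | github.com/20240807-YR/Amore-Crm-Explainable-Agent | agent10/product_selector.py | _extract_persona_keywords
-- ===== SOURCE A (Python) =====
-- from typing import Any, Dict, List, Optional, Tuple
--
-- def _extract_persona_keywords(row: Any) -> List[str]:
--     """Extract persona keywords for business rules (kept concise + stable)."""
--     persona_keywords: List[str] = []
--     if isinstance(row, dict):
--         for k in [
--             "persona_name",
--             "preference",
--             "shopping_pattern",
--             "lifestyle",
--             "skin_type",
--             "skin_concern",
--             "allergy_sensitivity",
--             "texture_preference",
--             "finish_preference",
--             "scent_preference",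
--             "time_of_use",
--             "seasonality",
--             "environment_context",
--         ]:
--             v = row.get(k)
--             if v is None:
--                 continue
--             s = "" if v is None else str(v).strip()
--             if not s:
--                 continue
--             for token in s.replace("/", ",").replace(";", ",").split(","):
--                 t = token.strip()
--                 if t:
--                     persona_keywords.append(t)
--     return persona_keywords
-- ===== SOURCE B (Python) =====
-- def _extract_persona_keywords(row):
--     """Extract persona keywords for business rules (kept concise + stable)."""
--     keywords = []
--     if isinstance(row, dict):
--         for k in [
--             "persona_name",
--             "preference",
--             "shopping_pattern",
--             "lifestyle",
--             "skin_type",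
--             "skin_concern",
--             "allergy_sensitivity",
--             "texture_preference",
--             "finish_preference",
--             "scent_preference",
--             "time_of_use",
--             "seasonality",
--             "environment_context",
--         ]:
--             v = row.get(k)
--             if v is None:
--                 continue
--             # single character scan: build tokens directly, flushing at each delimiter
--             buf = ""
--             for ch in str(v):
--                 if ch in (",", "/", ";"):
--                     t = buf.strip()
--                     if t:
--                         keywords.append(t)
--                     buf = ""
--                 else:
--                     buf += ch
--             t = buf.strip()
--             if t:
--                 keywords.append(t)
--     return keywords
-- ===== Notes on version B (the rewrite author's own statement) =====
-- stated objective: alternative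
-- what changed: B tokenizes each field value with a single character-level scan that maintains a token buffer and flushes it at every ','/'/'/';' delimiter, instead of A's replace/replace/split pipeline followed by a per-token strip loop.
import Mathlib
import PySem

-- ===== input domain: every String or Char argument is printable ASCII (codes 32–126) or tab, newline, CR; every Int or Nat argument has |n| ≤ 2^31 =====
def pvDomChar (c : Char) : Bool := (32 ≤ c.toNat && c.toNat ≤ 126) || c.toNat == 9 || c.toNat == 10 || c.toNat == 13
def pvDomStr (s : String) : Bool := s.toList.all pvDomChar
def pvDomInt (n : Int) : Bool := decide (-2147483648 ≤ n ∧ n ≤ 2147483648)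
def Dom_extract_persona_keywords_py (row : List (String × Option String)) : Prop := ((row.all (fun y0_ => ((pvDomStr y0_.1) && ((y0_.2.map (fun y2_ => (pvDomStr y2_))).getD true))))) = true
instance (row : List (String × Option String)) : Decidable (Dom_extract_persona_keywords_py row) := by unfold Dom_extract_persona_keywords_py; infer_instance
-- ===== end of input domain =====

-- B replaces A's replace/replace/split/strip pipeline per field by a single character-level
-- scan that builds tokens directly, flushing at each delimiter (objective: alternative, same cost).

-- the fixed key list both programs iterate over
def pvKeys : List String :=
  ["persona_name", "preference", "shopping_pattern", "lifestyle", "skin_type",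
   "skin_concern", "allergy_sensitivity", "texture_preference", "finish_preference",
   "scent_preference", "time_of_use", "seasonality", "environment_context"]

-- ===== PORT A =====
def extract_persona_keywords_py (row : List (String × Option String)) : List String :=
  pvKeys.foldl (fun acc k =>
    match (PySem.Dict.mk row).get? k with
    | none => acc                -- v is None (key absent, .get defaults to None)
    | some none => acc           -- v is None
    | some (some v) =>
      let s := PySem.Str.strip v   -- str(v).strip(); v is a str so str(v) = v
      if s = "" then acc
      else ((PySem.Str.split? (PySem.Str.replace (PySem.Str.replace s "/" ",") ";" ",") ",").getD []).foldl
        (fun acc2 token =>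
          let t := PySem.Str.strip token
          if t = "" then acc2 else acc2 ++ [t]) acc) []

-- ===== PORT B =====
-- one scan step over a character of the current value: flush at a delimiter, else grow the buffer
def pvStepB (st : List String × String) (c : Char) : List String × String :=
  if c = ',' ∨ c = '/' ∨ c = ';' then
    let t := PySem.Str.strip st.2
    (if t = "" then st.1 else st.1 ++ [t], "")
  else (st.1, st.2.push c)

def extract_persona_keywords_py_alt (row : List (String × Option String)) : List String :=
  pvKeys.foldl (fun acc k =>
    match (PySem.Dict.mk row).get? k with
    | some (some v) =>
        let st := v.toList.foldl pvStepB (acc, "")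
        let t := PySem.Str.strip st.2
        if t = "" then st.1 else st.1 ++ [t]
    | _ => acc) []

-- ===== PRECONDITION & SPEC =====
def Spec_extract_persona_keywords_py (row : List (String × Option String)) (out : List String) : Prop := out = extract_persona_keywords_py_alt row
instance (row : List (String × Option String)) (out : List String) : Decidable (Spec_extract_persona_keywords_py row out) := by unfold Spec_extract_persona_keywords_py; infer_instance

-- ===== CLAIM (what is proved, stated in full; the proofs are below) =====
def Claim_equal_extract_persona_keywords_py : Prop := ∀ (row : List (String × Option String)), Dom_extract_persona_keywords_py row → Spec_extract_persona_keywords_py row (extract_persona_keywords_py row)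

-- ===== LEMMAS AND PROOFS =====

-- single-pass normalisation performed by .replace("/", ",").replace(";", ",")
def pvNorm (c : Char) : Char := if c = '/' then ',' else if c = ';' then ',' else c

-- what splitting on a single comma computes, structurally
def pvSplit : List Char → List (List Char)
  | [] => [[]]
  | c :: t => if c = ',' then [] :: pvSplit t else (pvSplit t).modifyHead (c :: ·)

-- the ordered token list one tokenisation pass produces
def pvTok (cs : List Char) : List (List Char) :=
  ((pvSplit (cs.map pvNorm)).map PySem.Chars.strip).filter (· ≠ [])

def pvTokS (s : String) : List String := (pvTok s.toList).map String.ofList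

-- the value both programs read for a key (absent and None collapse)
def pvGet (row : List (String × Option String)) (k : String) : Option String :=
  match (PySem.Dict.mk row).get? k with
  | some (some v) => some v
  | _ => none

-- extend the last chunk (what appending separator-free text does to pvSplit)
def pvExt (ws : List Char) : List (List Char) → List (List Char)
  | [] => []
  | [x] => [x ++ ws]
  | x :: y :: t => x :: pvExt ws (y :: t)

theorem go_replace (o n : Char) : ∀ (l : List Char) (fuel : Nat) (acc : List Char), l.length ≤ fuel →
    PySem.Chars.replace.go [o] [n] fuel l acc = acc.reverse ++ l.map (fun c => if c = o then n else c) := by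
  intro l
  induction l with
  | nil => intro fuel acc h; cases fuel <;> simp [PySem.Chars.replace.go]
  | cons c t ih =>
    intro fuel acc h
    cases fuel with
    | zero => simp at h
    | succ f =>
      simp only [PySem.Chars.replace.go, List.isPrefixOf, List.length_cons] at *
      by_cases hc : o = c
      · subst hc
        simp only [beq_self_eq_true, Bool.true_and, List.isPrefixOf_nil_left, if_true]
        simp only [List.length_nil, Nat.zero_add, List.drop_one, List.tail_cons]
        rw [ih f _ (by omega)]
        simp
      · have : (o == c) = false := by simp [hc]
        simp only [this, Bool.false_and, if_false]
        rw [ih f _ (by omega)]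
        simp [Ne.symm hc]

theorem pvReplace_single (cs : List Char) (o n : Char) :
    PySem.Chars.replace cs [o] [n] = cs.map (fun c => if c = o then n else c) := by
  simp only [PySem.Chars.replace, List.isEmpty_cons, if_false]
  rw [go_replace o n cs cs.length [] (le_refl _)]
  simp

theorem pvSplit_ne_nil (cs : List Char) : pvSplit cs ≠ [] := by
  induction cs with
  | nil => simp [pvSplit]
  | cons c t ih =>
    simp only [pvSplit]
    split
    · simp
    · cases h : pvSplit t with
      | nil => exact absurd h ih
      | cons a b => simp

theorem go_split : ∀ (l : List Char) (fuel : Nat) (cur : List Char) (acc : List (List Char)), l.length < fuel →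
    PySem.Chars.splitOn.go [','] fuel l cur acc
      = acc.reverse ++ (pvSplit l).modifyHead (cur.reverse ++ ·) := by
  intro l
  induction l with
  | nil => intro fuel cur acc h; cases fuel with
    | zero => omega
    | succ f => simp [PySem.Chars.splitOn.go, pvSplit]
  | cons c t ih =>
    intro fuel cur acc h
    cases fuel with
    | zero => omega
    | succ f =>
      simp only [PySem.Chars.splitOn.go, List.isPrefixOf, List.length_cons] at *
      by_cases hc : c = ','
      · subst hc
        simp only [beq_self_eq_true, Bool.true_and, List.isPrefixOf_nil_left, if_true]
        simp only [List.length_nil, Nat.zero_add, List.drop_one, List.tail_cons]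
        rw [ih f [] _ (by omega)]
        cases hs : pvSplit t with
        | nil => exact absurd hs (pvSplit_ne_nil t)
        | cons x xs => simp [pvSplit, hs]
      · have : (',' == c) = false := by simp [Ne.symm hc]
        simp only [this, Bool.false_and, if_false]
        rw [ih f (c :: cur) _ (by omega)]
        simp only [pvSplit, hc, if_false]
        cases hs : pvSplit t with
        | nil => exact absurd hs (pvSplit_ne_nil t)
        | cons x xs => simp

theorem pvSplitOn_comma (cs : List Char) :
    PySem.Chars.splitOn cs [','] = pvSplit cs := by
  rw [PySem.Chars.splitOn, go_split cs (cs.length + 1) [] [] (by omega)]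
  cases hs : pvSplit cs with
  | nil => exact absurd hs (pvSplit_ne_nil cs)
  | cons x xs => simp

theorem pvIsspace_not_special (c : Char) (h : PySem.Chars.isspace c = true) :
    c ≠ ',' ∧ c ≠ '/' ∧ c ≠ ';' := by
  refine ⟨?_, ?_, ?_⟩ <;> rintro rfl <;> exact absurd h (by decide)

theorem pvNorm_space (c : Char) (h : PySem.Chars.isspace c = true) : pvNorm c = c := by
  obtain ⟨_, h2, h3⟩ := pvIsspace_not_special c h
  simp [pvNorm, h2, h3]

theorem pvStrip_cons_space (w : Char) (x : List Char) (h : PySem.Chars.isspace w = true) :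
    PySem.Chars.strip (w :: x) = PySem.Chars.strip x := by
  simp [PySem.Chars.strip, PySem.Chars.lstrip, h]

theorem pvDropWhile_space_nil (ws : List Char) (h : ws.all PySem.Chars.isspace) :
    ws.dropWhile PySem.Chars.isspace = [] := by
  rw [List.dropWhile_eq_nil_iff]
  intro x hx
  exact List.all_eq_true.mp h x hx

theorem pvRstrip_append_space (x ws : List Char) (h : ws.all PySem.Chars.isspace) :
    PySem.Chars.rstrip (x ++ ws) = PySem.Chars.rstrip x := by
  simp only [PySem.Chars.rstrip, List.reverse_append, List.dropWhile_append,
    pvDropWhile_space_nil ws.reverse (by simpa using h), List.isEmpty_nil, if_true]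

theorem pvStrip_append_space (x ws : List Char) (h : ws.all PySem.Chars.isspace) :
    PySem.Chars.strip (x ++ ws) = PySem.Chars.strip x := by
  simp only [PySem.Chars.strip, PySem.Chars.lstrip, List.dropWhile_append]
  split
  · next he =>
    rw [pvDropWhile_space_nil ws h]
    have : x.dropWhile PySem.Chars.isspace = [] := by simpa using he
    rw [this]
  · exact pvRstrip_append_space _ ws h

theorem pvTok_space_append (ws x : List Char) (h : ws.all PySem.Chars.isspace) :
    pvTok (ws ++ x) = pvTok x := by
  induction ws with
  | nil => simp
  | cons w t ih =>
    simp only [List.all_cons, Bool.and_eq_true] at h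
    obtain ⟨hw, ht⟩ := h
    rw [← ih ht]
    simp only [pvTok, List.cons_append, List.map_cons, pvNorm_space w hw, pvSplit]
    rw [if_neg (pvIsspace_not_special w hw).1]
    cases hs : pvSplit ((t ++ x).map pvNorm) with
    | nil => exact absurd hs (pvSplit_ne_nil _)
    | cons a b => simp [pvStrip_cons_space w a hw]

theorem pvSplit_append_comma (a b : List Char) :
    pvSplit (a ++ ',' :: b) = pvSplit a ++ pvSplit b := by
  induction a with
  | nil => simp [pvSplit]
  | cons c t ih =>
    simp only [List.cons_append, pvSplit, ih]
    split
    · rfl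
    · cases h : pvSplit t with
      | nil => exact absurd h (pvSplit_ne_nil t)
      | cons x xs => simp

theorem pvSplit_nocomma (ws : List Char) (h : ∀ c ∈ ws, c ≠ ',') : pvSplit ws = [ws] := by
  induction ws with
  | nil => simp [pvSplit]
  | cons c t ih =>
    simp only [pvSplit, if_neg (h c (by simp))]
    rw [ih (fun c hc => h c (by simp [hc]))]
    simp

theorem pvSplit_append_nocomma (x ws : List Char) (h : ∀ c ∈ ws, c ≠ ',') :
    pvSplit (x ++ ws) = pvExt ws (pvSplit x) := by
  induction x with
  | nil => simp [pvSplit_nocomma ws h, pvSplit, pvExt]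
  | cons c t ih =>
    simp only [List.cons_append, pvSplit, ih]
    split
    · cases hs : pvSplit t with
      | nil => exact absurd hs (pvSplit_ne_nil t)
      | cons a b => cases b <;> simp [pvExt, hs]
    · cases hs : pvSplit t with
      | nil => exact absurd hs (pvSplit_ne_nil t)
      | cons a b => cases b <;> simp [pvExt, hs]

theorem pvMap_strip_pvExt (ws : List Char) (L : List (List Char)) (h : ws.all PySem.Chars.isspace) :
    (pvExt ws L).map PySem.Chars.strip = L.map PySem.Chars.strip := by
  induction L with
  | nil => simp [pvExt]
  | cons a b ih =>
    cases b with
    | nil => simp [pvExt, pvStrip_append_space a ws h]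
    | cons y t => simpa [pvExt] using ih

theorem pvMap_norm_space (ws : List Char) (h : ws.all PySem.Chars.isspace) :
    ws.map pvNorm = ws := by
  induction ws with
  | nil => rfl
  | cons w t ih =>
    simp only [List.all_cons, Bool.and_eq_true] at h
    simp [pvNorm_space w h.1, ih h.2]

theorem pvTok_append_space (x ws : List Char) (h : ws.all PySem.Chars.isspace) :
    pvTok (x ++ ws) = pvTok x := by
  simp only [pvTok, List.map_append, pvMap_norm_space ws h]
  rw [pvSplit_append_nocomma _ ws (fun c hc => ((pvIsspace_not_special c (List.all_eq_true.mp h c hc)).1)),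
    pvMap_strip_pvExt ws _ h]

theorem pvTok_strip (cs : List Char) : pvTok (PySem.Chars.strip cs) = pvTok cs := by
  have h1 : pvTok cs = pvTok (PySem.Chars.lstrip cs) := by
    conv_lhs => rw [← List.takeWhile_append_dropWhile (p := PySem.Chars.isspace) (l := cs)]
    exact pvTok_space_append _ _ (by rw [List.all_eq_true]; exact fun x hx => List.mem_takeWhile_imp hx)
  have h2 : PySem.Chars.lstrip cs
      = PySem.Chars.strip cs ++ ((PySem.Chars.lstrip cs).reverse.takeWhile PySem.Chars.isspace).reverse := by
    simp only [PySem.Chars.strip, PySem.Chars.rstrip]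
    conv_lhs => rw [← List.reverse_reverse (PySem.Chars.lstrip cs),
      ← List.takeWhile_append_dropWhile (p := PySem.Chars.isspace) (l := (PySem.Chars.lstrip cs).reverse)]
    rw [← List.reverse_append, List.takeWhile_append_dropWhile, List.reverse_reverse]
  rw [h1, h2, pvTok_append_space _ _ (by rw [List.all_eq_true]; exact fun x hx => by simpa using List.mem_takeWhile_imp (by simpa using hx))]

theorem pvTok_nil : pvTok [] = [] := by simp [pvTok, pvSplit, PySem.Chars.strip, PySem.Chars.lstrip, PySem.Chars.rstrip]

theorem pvOfList_eq_empty_iff (y : List Char) : String.ofList y = "" ↔ y = [] := by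
  constructor
  · intro h
    have := congrArg String.toList h
    simpa using this
  · rintro rfl; rfl

theorem pvTokloop (parts : List (List Char)) (init : List String) :
    (parts.map String.ofList).foldl (fun acc token =>
        let t := PySem.Str.strip token
        if t = "" then acc else acc ++ [t]) init
      = init ++ ((parts.map PySem.Chars.strip).filter (· ≠ [])).map String.ofList := by
  induction parts generalizing init with
  | nil => simp
  | cons x t ih =>
    have hx' : PySem.Str.strip (String.ofList x) = String.ofList (PySem.Chars.strip x) := by
      simp [PySem.Str.strip]
    simp only [List.map_cons, List.foldl_cons, hx']
    by_cases hx : PySem.Chars.strip x = []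
    · rw [if_pos ((pvOfList_eq_empty_iff _).mpr hx), ih]
      simp [List.filter_cons, hx]
    · rw [if_neg (fun h => hx ((pvOfList_eq_empty_iff _).mp h)), ih]
      simp [List.filter_cons, hx]

theorem pvMap_norm2 (cs : List Char) :
    (cs.map (fun c => if c = '/' then ',' else c)).map (fun c => if c = ';' then ',' else c)
      = cs.map pvNorm := by
  induction cs with
  | nil => rfl
  | cons c t ih =>
    simp only [List.map_cons, ih, pvNorm]
    by_cases h1 : c = '/' <;> by_cases h2 : c = ';' <;> simp [h1, h2] <;> simp_all

theorem pvTokrun (s : String) (init : List String) :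
    ((PySem.Str.split? (PySem.Str.replace (PySem.Str.replace s "/" ",") ";" ",") ",").getD []).foldl
      (fun acc token =>
        let t := PySem.Str.strip token
        if t = "" then acc else acc ++ [t]) init
      = init ++ pvTokS s := by
  have h1 : (PySem.Str.replace (PySem.Str.replace s "/" ",") ";" ",").toList = s.toList.map pvNorm := by
    simp only [PySem.Str.toList_replace]
    show PySem.Chars.replace (PySem.Chars.replace s.toList ['/'] [',']) [';'] [','] = _
    rw [pvReplace_single, pvReplace_single, pvMap_norm2]
  have h2 : PySem.Str.split? (PySem.Str.replace (PySem.Str.replace s "/" ",") ";" ",") ","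
      = some ((pvSplit (s.toList.map pvNorm)).map String.ofList) := by
    simp only [PySem.Str.split?, PySem.Chars.split?, h1]
    rw [if_neg (by simp)]
    rw [show (",").toList = [','] by decide, pvSplitOn_comma]
    rfl
  rw [h2]
  simp only [Option.getD_some]
  rw [pvTokloop]
  rfl

theorem pvTokS_strip (v : String) : pvTokS (PySem.Str.strip v) = pvTokS v := by
  simp only [pvTokS, PySem.Str.strip, String.toList_ofList, pvTok_strip]

theorem pvA_fold (row : List (String × Option String)) (ks : List String) (acc : List String) :
    ks.foldl (fun acc k =>
      match (PySem.Dict.mk row).get? k with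
      | none => acc
      | some none => acc
      | some (some v) =>
        let s := PySem.Str.strip v
        if s = "" then acc
        else ((PySem.Str.split? (PySem.Str.replace (PySem.Str.replace s "/" ",") ";" ",") ",").getD []).foldl
          (fun acc2 token =>
            let t := PySem.Str.strip token
            if t = "" then acc2 else acc2 ++ [t]) acc) acc
    = acc ++ (ks.filterMap (pvGet row)).flatMap pvTokS := by
  induction ks generalizing acc with
  | nil => simp
  | cons k t ih =>
    simp only [List.foldl_cons, List.filterMap_cons]
    cases hg : (PySem.Dict.mk row).get? k with
    | none => rw [ih]; simp [pvGet, hg]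
    | some o =>
      cases o with
      | none => rw [ih]; simp [pvGet, hg]
      | some v =>
        simp only []
        by_cases hv : PySem.Str.strip v = ""
        · rw [if_pos hv, ih]
          have : pvTokS v = [] := by
            rw [← pvTokS_strip, hv]; simp [pvTokS, pvTok_nil]
          simp [pvGet, hg, this]
        · rw [if_neg hv, pvTokrun, ih]
          simp [pvGet, hg, pvTokS_strip]

-- ===== B-side lemmas: the character scan computes the same token list =====

-- a non-delimiter character is fixed by pvNorm
theorem pvNorm_nondelim (c : Char) (h : ¬(c = ',' ∨ c = '/' ∨ c = ';')) : pvNorm c = c := by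
  push_neg at h
  simp [pvNorm, h.2.1, h.2.2]

theorem pvTok_nodelim (ws : List Char) (h : ∀ c ∈ ws, ¬(c = ',' ∨ c = '/' ∨ c = ';')) :
    pvTok ws = [PySem.Chars.strip ws].filter (· ≠ []) := by
  have hm : ws.map pvNorm = ws := by
    induction ws with
    | nil => rfl
    | cons c t ih =>
      simp only [List.map_cons]
      rw [pvNorm_nondelim c (h c (by simp)), ih (fun c hc => h c (by simp [hc]))]
  rw [pvTok, hm, pvSplit_nocomma ws (fun c hc hce => h c hc (Or.inl hce))]
  simp

theorem pvTok_delim_cons (buf : List Char) (c : Char) (t : List Char)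
    (hb : ∀ x ∈ buf, ¬(x = ',' ∨ x = '/' ∨ x = ';')) (hc : c = ',' ∨ c = '/' ∨ c = ';') :
    pvTok (buf ++ c :: t) = [PySem.Chars.strip buf].filter (· ≠ []) ++ pvTok t := by
  have hbn : buf.map pvNorm = buf := by
    induction buf with
    | nil => rfl
    | cons x u ih =>
      simp only [List.map_cons]
      rw [pvNorm_nondelim x (hb x (by simp)), ih (fun y hy => hb y (by simp [hy]))]
  have hcn : pvNorm c = ',' := by
    rcases hc with rfl | rfl | rfl <;> rfl
  simp only [pvTok, List.map_append, List.map_cons, hbn, hcn, pvSplit_append_comma,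
    List.map_append, List.filter_append]
  rw [pvSplit_nocomma buf (fun x hx hxe => hb x hx (Or.inl hxe))]
  simp

-- the scan over one value's characters, with a delimiter-free buffer, flushes to the token list
theorem pvScanB (cs : List Char) (acc : List String) (buf : List Char)
    (hb : ∀ x ∈ buf, ¬(x = ',' ∨ x = '/' ∨ x = ';')) :
    (let st := cs.foldl pvStepB (acc, String.ofList buf)
     let t := PySem.Str.strip st.2
     if t = "" then st.1 else st.1 ++ [t])
    = acc ++ (pvTok (buf ++ cs)).map String.ofList := by
  induction cs generalizing acc buf with
  | nil =>
    have hx' : PySem.Str.strip (String.ofList buf) = String.ofList (PySem.Chars.strip buf) := by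
      simp [PySem.Str.strip]
    simp only [List.foldl_nil, hx', List.append_nil, pvTok_nodelim buf hb]
    by_cases h : PySem.Chars.strip buf = []
    · rw [if_pos ((pvOfList_eq_empty_iff _).mpr h)]
      simp [List.filter_cons, h]
    · rw [if_neg (fun hh => h ((pvOfList_eq_empty_iff _).mp hh))]
      simp [List.filter_cons, h]
  | cons c t ih =>
    simp only [List.foldl_cons]
    by_cases hc : c = ',' ∨ c = '/' ∨ c = ';'
    · have hx' : PySem.Str.strip (String.ofList buf) = String.ofList (PySem.Chars.strip buf) := by
        simp [PySem.Str.strip]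
      simp only [pvStepB, if_pos hc, hx']
      rw [pvTok_delim_cons buf c t hb hc]
      by_cases h : PySem.Chars.strip buf = []
      · rw [if_pos ((pvOfList_eq_empty_iff _).mpr h)]
        have := ih acc [] (by simp)
        simp only [List.nil_append] at this
        rw [show ("" : String) = String.ofList [] from rfl] at this ⊢
        rw [this]
        simp [List.filter_cons, h]
      · rw [if_neg (fun hh => h ((pvOfList_eq_empty_iff _).mp hh))]
        have := ih (acc ++ [String.ofList (PySem.Chars.strip buf)]) [] (by simp)
        simp only [List.nil_append] at this
        rw [show ("" : String) = String.ofList [] from rfl] at this ⊢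
        rw [this]
        simp [List.filter_cons, h]
    · have hpush : (String.ofList buf).push c = String.ofList (buf ++ [c]) := by
        apply String.toList_injective
        simp
      simp only [pvStepB, if_neg hc, hpush]
      have hb' : ∀ x ∈ buf ++ [c], ¬(x = ',' ∨ x = '/' ∨ x = ';') := by
        intro x hx
        rcases List.mem_append.mp hx with h | h
        · exact hb x h
        · simp at h; subst h; exact hc
      rw [ih acc (buf ++ [c]) hb']
      simp

-- the whole B key-fold accumulates the flat token list
theorem pvB_fold (row : List (String × Option String)) (ks : List String) (acc : List String) :
    ks.foldl (fun acc k =>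
      match (PySem.Dict.mk row).get? k with
      | some (some v) =>
          let st := v.toList.foldl pvStepB (acc, "")
          let t := PySem.Str.strip st.2
          if t = "" then st.1 else st.1 ++ [t]
      | _ => acc) acc
    = acc ++ (ks.filterMap (pvGet row)).flatMap pvTokS := by
  induction ks generalizing acc with
  | nil => simp
  | cons k t ih =>
    simp only [List.foldl_cons, List.filterMap_cons]
    cases hg : (PySem.Dict.mk row).get? k with
    | none => rw [ih]; simp [pvGet, hg]
    | some o =>
      cases o with
      | none => rw [ih]; simp [pvGet, hg]
      | some v =>
        simp only []
        have := pvScanB v.toList acc [] (by simp)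
        simp only [List.nil_append] at this
        rw [show ("" : String) = String.ofList [] from rfl, this, ih]
        simp [pvGet, hg, pvTokS]

-- ===== VERDICT (by name: the statement is the Claim_ definition above) =====
theorem extract_persona_keywords_py_spec : Claim_equal_extract_persona_keywords_py := by
  intro row _
  unfold Spec_extract_persona_keywords_py extract_persona_keywords_py extract_persona_keywords_py_alt
  rw [pvA_fold, pvB_fold]
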